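-- pv_equiv track=rewrite | github.com/kamiderka/WDI-2024 | Zestaw 3 - Tablice o większej liczbie wymiarów/zad095.py | max_quotient_col_to_row_sum
-- ===== SOURCE A (Python) =====
-- def max_quotient_col_to_row_sum(t : list[list[int]])->tuple[int,int]:
--
--     col_max, col_ind = float('-inf'), -1
--     for x in range(0, len(t[0])):
--         curr_sum = 0
--         for y in range(0, len(t)):
--             curr_sum += t[y][x]
--         if curr_sum > col_max:
--             col_max = curr_sum
--             col_ind = x
--
--     row_min, row_ind = float('inf'), -1
--     for y in range(0, len(t)):
--         curr_sum = sum(t[y])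
--         if curr_sum != 0 and curr_sum < row_min:
--             row_min = curr_sum
--             row_ind = y
--
--     if row_ind == -1 or col_ind == - 1:
--         return -1, -1
--
--     return row_ind, col_ind
-- ===== SOURCE B (Python) =====
-- def max_quotient_col_to_row_sum(t: list[list[int]]) -> tuple[int, int]:
--     col_sums = [0] * len(t[0])
--     row_min, row_ind = None, -1
--     for y, row in enumerate(t):
--         col_sums = [c + v for c, v in zip(col_sums, row)]
--         s = sum(row)
--         if s != 0 and (row_min is None or s < row_min):
--             row_min, row_ind = s, y
--     col_max, col_ind = None, -1
--     for x, s in enumerate(col_sums):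
--         if col_max is None or s > col_max:
--             col_max, col_ind = s, x
--     if row_ind == -1 or col_ind == -1:
--         return -1, -1
--     return row_ind, col_ind
-- ===== Notes on version B (the rewrite author's own statement) =====
-- stated objective: alternative
-- what changed: A makes a column-major pass with an inner loop per column plus a separate indexed row pass; B makes one row-major pass over the rows maintaining a column-sum list and the nonzero row minimum together, then a single scan of the column sums.
import Mathlib
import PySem

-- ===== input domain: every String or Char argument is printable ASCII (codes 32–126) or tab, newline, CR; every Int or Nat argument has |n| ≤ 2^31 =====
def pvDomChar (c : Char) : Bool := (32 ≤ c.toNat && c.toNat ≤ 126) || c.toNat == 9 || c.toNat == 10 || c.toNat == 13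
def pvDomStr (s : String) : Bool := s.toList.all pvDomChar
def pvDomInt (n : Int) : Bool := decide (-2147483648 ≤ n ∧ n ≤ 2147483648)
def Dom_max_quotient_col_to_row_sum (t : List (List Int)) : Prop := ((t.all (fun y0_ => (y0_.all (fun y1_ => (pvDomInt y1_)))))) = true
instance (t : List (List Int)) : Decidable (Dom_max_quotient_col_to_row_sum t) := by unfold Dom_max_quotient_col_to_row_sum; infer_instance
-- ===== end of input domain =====

-- B fuses the two index-driven passes of A into one row-major pass over the rows themselves
-- (column sums accumulated in a list, row minimum maintained on the way), then one scan of
-- the column-sum list; same first-wins strict comparisons, same return value (objective: alternative).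

-- ===== PORT A =====
-- Within Pre_ every index A uses is in range, so t[0], t[y] and t[y][x] are ported with
-- headD/pyGetD (exact there); float('-inf')/float('inf') sentinels become Option.none.
def max_quotient_col_to_row_sum (t : List (List Int)) : Int × Int :=
  let colSt := (PySem.List.pyRange 0 (((t.headD []).length : Int)) 1).foldl
    (fun (st : Option Int × Int) x =>
      let s := (PySem.List.pyRange 0 ((t.length : Int)) 1).foldl
        (fun acc y => acc + PySem.List.pyGetD (PySem.List.pyGetD t y []) x 0) 0
      match st.1 with
      | none => (some s, x)
      | some m => if s > m then (some s, x) else st)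
    (none, -1)
  let rowSt := (PySem.List.pyRange 0 ((t.length : Int)) 1).foldl
    (fun (st : Option Int × Int) y =>
      let s := (PySem.List.pyGetD t y []).foldl (· + ·) 0
      match st.1 with
      | none => if s ≠ 0 then (some s, y) else st
      | some m => if s ≠ 0 ∧ s < m then (some s, y) else st)
    (none, -1)
  if rowSt.2 = -1 ∨ colSt.2 = -1 then (-1, -1) else (rowSt.2, colSt.2)

-- ===== PORT B =====
def max_quotient_col_to_row_sum_alt (t : List (List Int)) : Int × Int :=
  let st := (PySem.List.enumerate t 0).foldl
    (fun (st : List Int × Option Int × Int) yr =>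
      let cs := List.zipWith (· + ·) st.1 yr.2
      let s := yr.2.foldl (· + ·) 0
      match st.2.1 with
      | none => if s ≠ 0 then (cs, some s, yr.1) else (cs, st.2)
      | some m => if s ≠ 0 ∧ s < m then (cs, some s, yr.1) else (cs, st.2))
    (List.replicate (t.headD []).length 0, none, -1)
  let colSt := (PySem.List.enumerate st.1 0).foldl
    (fun (c : Option Int × Int) xs =>
      match c.1 with
      | none => (some xs.2, xs.1)
      | some m => if xs.2 > m then (some xs.2, xs.1) else c)
    (none, -1)
  if st.2.2 = -1 ∨ colSt.2 = -1 then (-1, -1) else (st.2.2, colSt.2)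

-- ===== PRECONDITION & SPEC =====
-- A raises IndexError on the empty matrix (t[0]) and whenever some row is shorter than the
-- first row (t[y][x] in the column loop); exactly those inputs are excluded.
def Pre_max_quotient_col_to_row_sum (t : List (List Int)) : Prop :=
  t ≠ [] ∧ ∀ r ∈ t, (t.headD []).length ≤ r.length
instance (t : List (List Int)) : Decidable (Pre_max_quotient_col_to_row_sum t) := by
  unfold Pre_max_quotient_col_to_row_sum; infer_instance
def pvWitness_max_quotient_col_to_row_sum : List (List Int) := [[1, 2], [3, 4]]

def Spec_max_quotient_col_to_row_sum (t : List (List Int)) (out : Int × Int) : Prop := out = max_quotient_col_to_row_sum_alt t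
instance (t : List (List Int)) (out : Int × Int) : Decidable (Spec_max_quotient_col_to_row_sum t out) := by unfold Spec_max_quotient_col_to_row_sum; infer_instance

-- ===== CLAIM (what is proved, stated in full; the proofs are below) =====
def Claim_equal_max_quotient_col_to_row_sum : Prop := ∀ (t : List (List Int)), Dom_max_quotient_col_to_row_sum t → Pre_max_quotient_col_to_row_sum t → Spec_max_quotient_col_to_row_sum t (max_quotient_col_to_row_sum t)

-- ===== LEMMAS AND PROOFS =====

-- a foldl whose step acts componentwise on a product state splits into two foldls
theorem pv_foldl_prod {α β γ : Type} (l : List γ) (f : α → γ → α) (g : β → γ → β)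
    (a : α) (b : β) :
    l.foldl (fun p x => (f p.1 x, g p.2 x)) (a, b) = (l.foldl f a, l.foldl g b) := by
  induction l generalizing a b with
  | nil => rfl
  | cons x xs ih => simp [List.foldl, ih]

-- length of the accumulated column-sum list is preserved
theorem pv_len_foldl_zipWith (rs : List (List Int)) (cs : List Int)
    (h : ∀ r ∈ rs, cs.length ≤ r.length) :
    (rs.foldl (fun c r => List.zipWith (· + ·) c r) cs).length = cs.length := by
  induction rs generalizing cs with
  | nil => rfl
  | cons r rs ih =>
    have h1 : cs.length ≤ r.length := h r (by simp)
    have hlen : (List.zipWith (· + ·) cs r).length = cs.length := by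
      simp [List.length_zipWith]; omega
    have h2 : ∀ r' ∈ rs, (List.zipWith (· + ·) cs r).length ≤ r'.length := by
      intro r' hr'; rw [hlen]; exact h r' (by simp [hr'])
    simp only [List.foldl_cons]
    rw [ih _ h2, hlen]

-- entrywise characterisation of the accumulated column sums
theorem pv_getD_foldl_zipWith (rs : List (List Int)) (cs : List Int) (i : Nat)
    (h : ∀ r ∈ rs, cs.length ≤ r.length) (hi : i < cs.length) :
    (rs.foldl (fun c r => List.zipWith (· + ·) c r) cs).getD i 0
      = rs.foldl (fun a r => a + r.getD i 0) (cs.getD i 0) := by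
  induction rs generalizing cs with
  | nil => rfl
  | cons r rs ih =>
    have h1 : cs.length ≤ r.length := h r (by simp)
    have hlen : (List.zipWith (· + ·) cs r).length = cs.length := by
      simp [List.length_zipWith]; omega
    have h2 : ∀ r' ∈ rs, (List.zipWith (· + ·) cs r).length ≤ r'.length := by
      intro r' hr'; rw [hlen]; exact h r' (by simp [hr'])
    simp only [List.foldl_cons]
    rw [ih _ h2 (by omega)]
    congr 1
    have hir : i < r.length := by omega
    simp [List.getD, List.getElem?_zipWith, List.getElem?_eq_getElem hi,
      List.getElem?_eq_getElem hir]


-- row-minimum step (shared shape of both ports' row updates, over (index, row) pairs)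
def pvG (st : Option Int × Int) (yr : Int × List Int) : Option Int × Int :=
  let s := yr.2.foldl (· + ·) 0
  match st.1 with
  | none => if s ≠ 0 then (some s, yr.1) else st
  | some m => if s ≠ 0 ∧ s < m then (some s, yr.1) else st

-- column-maximum step over (index, sum) pairs
def pvC (c : Option Int × Int) (xs : Int × Int) : Option Int × Int :=
  match c.1 with
  | none => (some xs.2, xs.1)
  | some m => if xs.2 > m then (some xs.2, xs.1) else c

-- A's inner column sum
def pvS (t : List (List Int)) (x : Int) : Int :=
  (PySem.List.pyRange 0 ((t.length : Int)) 1).foldl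
    (fun acc y => acc + PySem.List.pyGetD (PySem.List.pyGetD t y []) x 0) 0

-- B's accumulated column-sum list
def pvCS (t : List (List Int)) : List Int :=
  t.foldl (fun c r => List.zipWith (· + ·) c r) (List.replicate (t.headD []).length 0)

theorem pv_A_form (t : List (List Int)) :
    max_quotient_col_to_row_sum t =
      (let rowSt := (PySem.List.pyRange 0 ((t.length : Int)) 1).foldl
          (fun st y => pvG st (y, PySem.List.pyGetD t y [])) (none, -1)
       let colSt := (PySem.List.pyRange 0 (((t.headD []).length : Int)) 1).foldl
          (fun st x => pvC st (x, pvS t x)) (none, -1)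
       if rowSt.2 = -1 ∨ colSt.2 = -1 then (-1, -1) else (rowSt.2, colSt.2)) := rfl

theorem pv_B_step_eq :
    (fun (st : List Int × Option Int × Int) (yr : Int × List Int) =>
      let cs := List.zipWith (· + ·) st.1 yr.2
      let s := yr.2.foldl (· + ·) 0
      match st.2.1 with
      | none => if s ≠ 0 then (cs, some s, yr.1) else (cs, st.2)
      | some m => if s ≠ 0 ∧ s < m then (cs, some s, yr.1) else (cs, st.2))
    = fun st yr => (List.zipWith (· + ·) st.1 yr.2, pvG st.2 yr) := by
  funext st yr
  obtain ⟨cs0, rm, ri⟩ := st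
  cases rm <;> simp only [pvG] <;> split <;> rfl

theorem pv_foldl_enum_snd {α β : Type} (l : List α) (s : Int) (g : β → α → β) (init : β) :
    (PySem.List.enumerate l s).foldl (fun a p => g a p.2) init = l.foldl g init := by
  conv_rhs => rw [← PySem.List.map_snd_enumerate l s]
  rw [List.foldl_map]

theorem pv_B_form (t : List (List Int)) :
    max_quotient_col_to_row_sum_alt t =
      (let rowSt := (PySem.List.enumerate t 0).foldl pvG (none, -1)
       let colSt := (PySem.List.enumerate (pvCS t) 0).foldl pvC (none, -1)
       if rowSt.2 = -1 ∨ colSt.2 = -1 then (-1, -1) else (rowSt.2, colSt.2)) := by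
  unfold max_quotient_col_to_row_sum_alt
  rw [pv_B_step_eq]
  have hsplit := pv_foldl_prod (PySem.List.enumerate t 0)
    (fun (cs : List Int) (yr : Int × List Int) => List.zipWith (· + ·) cs yr.2) pvG
    (List.replicate (t.headD []).length 0) ((none : Option Int), (-1 : Int))
  have hcs : (PySem.List.enumerate t 0).foldl
      (fun (c : List Int) (yr : Int × List Int) => List.zipWith (· + ·) c yr.2)
      (List.replicate (t.headD []).length 0) = pvCS t :=
    pv_foldl_enum_snd t 0 _ _
  simp only [hsplit, hcs]
  rfl

theorem pv_row_eq (t : List (List Int)) :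
    (PySem.List.enumerate t 0).foldl pvG ((none : Option Int), (-1 : Int)) =
      (PySem.List.pyRange 0 ((t.length : Int)) 1).foldl
        (fun st y => pvG st (y, PySem.List.pyGetD t y [])) (none, -1) := by
  rw [PySem.List.enumerate_eq_map_pyRange t ([] : List Int), List.foldl_map]
  simp only [PySem.List.len_eq]

theorem pv_col_sum_eq (t : List (List Int))
    (hrow : ∀ r ∈ t, (t.headD []).length ≤ r.length)
    (j : Int) (h0 : 0 ≤ j) (hj : j < ((t.headD []).length : Int)) :
    PySem.List.pyGetD (pvCS t) j 0 = pvS t j := by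
  have hlen : (pvCS t).length = (t.headD []).length := by
    unfold pvCS
    rw [pv_len_foldl_zipWith t (List.replicate (t.headD []).length (0:Int)) (by intro r hr; rw [List.length_replicate]; exact hrow r hr)]
    exact List.length_replicate
  have h1 : PySem.List.pyGetD (pvCS t) j 0 = (pvCS t).getD j.toNat 0 :=
    PySem.List.pyGetD_of_nonneg _ 0 h0
  have h2 : (pvCS t).getD j.toNat 0
      = t.foldl (fun a r => a + r.getD j.toNat 0) ((List.replicate (t.headD []).length (0:Int)).getD j.toNat 0) := by
    unfold pvCS
    exact pv_getD_foldl_zipWith t (List.replicate (t.headD []).length (0:Int)) j.toNat (by intro r hr; rw [List.length_replicate]; exact hrow r hr) (by rw [List.length_replicate]; omega)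
  have h3 : (List.replicate (t.headD []).length (0:Int)).getD j.toNat 0 = 0 := by
    simp [List.getD]
  have h4 : pvS t j = t.foldl (fun a r => a + PySem.List.pyGetD r j 0) 0 := by
    unfold pvS
    exact PySem.List.foldl_pyRange_zero_pyGetD' t []
      (fun (a : Int) (r : List Int) => a + PySem.List.pyGetD r j 0) 0
  have h5 : t.foldl (fun a r => a + PySem.List.pyGetD r j 0) 0
      = t.foldl (fun a r => a + r.getD j.toNat 0) 0 := by
    apply PySem.List.foldl_congr_mem
    intro acc r _
    rw [PySem.List.pyGetD_of_nonneg r 0 h0]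
  rw [h1, h2, h3, h4, h5]

theorem pv_col_eq (t : List (List Int))
    (hrow : ∀ r ∈ t, (t.headD []).length ≤ r.length) :
    (PySem.List.enumerate (pvCS t) 0).foldl pvC ((none : Option Int), (-1 : Int)) =
      (PySem.List.pyRange 0 (((t.headD []).length : Int)) 1).foldl
        (fun st x => pvC st (x, pvS t x)) (none, -1) := by
  have hlen : (pvCS t).length = (t.headD []).length := by
    unfold pvCS
    rw [pv_len_foldl_zipWith t (List.replicate (t.headD []).length (0:Int)) (by intro r hr; rw [List.length_replicate]; exact hrow r hr)]
    exact List.length_replicate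
  rw [PySem.List.enumerate_eq_map_pyRange (pvCS t) (0 : Int), List.foldl_map]
  simp only [PySem.List.len_eq, hlen]
  apply PySem.List.foldl_congr_mem
  intro acc j hjmem
  have hj := (PySem.List.mem_pyRange_one).mp hjmem
  congr 1
  exact congrArg _ (pv_col_sum_eq t hrow j hj.1 hj.2)

theorem max_quotient_spec_aux (t : List (List Int))
    (hpre : Pre_max_quotient_col_to_row_sum t) :
    max_quotient_col_to_row_sum t = max_quotient_col_to_row_sum_alt t := by
  obtain ⟨hne, hrow⟩ := hpre
  rw [pv_A_form, pv_B_form]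
  rw [pv_row_eq, pv_col_eq t hrow]

-- ===== VERDICT (by name: the statement is the Claim_ definition above) =====
theorem max_quotient_col_to_row_sum_spec : Claim_equal_max_quotient_col_to_row_sum := by
  intro t _ hpre
  simp only [Spec_max_quotient_col_to_row_sum]
  exact max_quotient_spec_aux t hpre
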